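-- pv_equiv track=rewrite | github.com/tm-ahad/codeforce | Seating Arrangments/main.py | seating_arrangements
-- ===== SOURCE A (Python) =====
-- def seating_arrangements(arr: list[int]) -> str:
--     i = len(arr)
--     res = ""
--     i2 = 0
--
--     while abs(i-i2) > 1:
--         arr.insert(i, arr[i2])
--         del arr[i2]
--
--         i -= 2
--         i2 += 1
--
--     for el in arr:
--         res += f"{el} "
--
--     return res;
-- ===== SOURCE B (Python) =====
-- def seating_arrangements(arr: list[int]) -> str:
--     # O(n) two-pointer sweep over a fixed list: each round places arr[lo+1] next at the
--     # front of the result and arr[lo], arr[hi-1] (in that nesting) at the back,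
--     # instead of A's quadratic insert/delete shuffling.  Does not mutate arr.
--     lo, hi = 0, len(arr)
--     front, back = [], []
--     while hi - lo >= 3:
--         front.append(arr[lo + 1])
--         back.append(arr[lo])
--         back.append(arr[hi - 1])
--         lo += 2
--         hi -= 1
--     if hi - lo == 2:
--         front.append(arr[lo + 1])
--         front.append(arr[lo])
--     elif hi - lo == 1:
--         front.append(arr[lo])
--     back.reverse()
--     return "".join(f"{x} " for x in front) + "".join(f"{x} " for x in back)
-- ===== Notes on version B (the rewrite author's own statement) =====
-- stated objective: faster
-- what changed: Replaces A's in-place insert/delete shuffling of the list (each step O(n)) by a single two-pointer sweep over the unchanged list that emits the result's front and back parts directly; also B does not mutate its argument.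
import Mathlib
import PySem

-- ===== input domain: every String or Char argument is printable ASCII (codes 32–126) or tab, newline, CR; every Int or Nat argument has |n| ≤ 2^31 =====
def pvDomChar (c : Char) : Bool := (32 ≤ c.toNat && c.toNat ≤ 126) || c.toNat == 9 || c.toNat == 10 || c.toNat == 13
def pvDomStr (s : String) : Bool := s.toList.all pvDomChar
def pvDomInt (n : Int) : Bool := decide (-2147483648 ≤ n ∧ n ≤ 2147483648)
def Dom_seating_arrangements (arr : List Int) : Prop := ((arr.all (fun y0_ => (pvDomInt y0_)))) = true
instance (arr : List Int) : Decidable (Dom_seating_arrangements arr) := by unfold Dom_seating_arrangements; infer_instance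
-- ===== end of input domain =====

-- B replaces A's quadratic in-place insert/delete shuffle by one O(n) two-pointer sweep
-- (the equality proved is about the RETURN value only: A mutates its argument, B does not).

-- ===== PORT A =====
-- A's while loop: arr.insert(i, arr[i2]); del arr[i2]; i -= 2; i2 += 1.
-- fuel only makes the recursion total; arr.length iterations always suffice for the
-- initial call, and every index access is in range there (the `none` arms are unreachable).
def seatingLoopA (fuel : Nat) (arr : List Int) (i i2 : Int) : List Int :=
  match fuel with
  | 0 => arr
  | fuel' + 1 =>
    if (i - i2).natAbs > 1 then
      match PySem.List.pyGet? arr i2 with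
      | none => arr                                  -- IndexError (unreachable here)
      | some x =>
        match PySem.List.pop? (PySem.List.insert arr i x) i2 with
        | none => PySem.List.insert arr i x          -- IndexError (unreachable here)
        | some (_, arr2) => seatingLoopA fuel' arr2 (i - 2) (i2 + 1)
    else arr

def seating_arrangements (arr : List Int) : String :=
  (seatingLoopA arr.length arr (arr.length : Int) 0).foldl
    (fun res el => res ++ PySem.Int.toStr el ++ " ") ""

-- ===== PORT B =====
-- the while loop of Source B: lo/hi two-pointer sweep collecting `front` and `back`
def seatingSweep (arr : List Int) (lo hi : Int) (front back : List Int) :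
    List Int × List Int :=
  if 3 ≤ hi - lo then
    seatingSweep arr (lo + 2) (hi - 1)
      (front ++ [PySem.List.pyGetD arr (lo + 1) 0])
      (back ++ [PySem.List.pyGetD arr lo 0, PySem.List.pyGetD arr (hi - 1) 0])
  else if hi - lo = 2 then
    (front ++ [PySem.List.pyGetD arr (lo + 1) 0, PySem.List.pyGetD arr lo 0], back)
  else if hi - lo = 1 then
    (front ++ [PySem.List.pyGetD arr lo 0], back)
  else (front, back)
termination_by (hi - lo).toNat
decreasing_by omega

def seating_arrangements_alt (arr : List Int) : String :=
  let fb := seatingSweep arr 0 (arr.length : Int) [] []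
  let back := fb.2.reverse
  PySem.Str.join "" (fb.1.map (fun x => PySem.Int.toStr x ++ " ")) ++
  PySem.Str.join "" (back.map (fun x => PySem.Int.toStr x ++ " "))

-- ===== PRECONDITION & SPEC =====
def Spec_seating_arrangements (arr : List Int) (out : String) : Prop := out = seating_arrangements_alt arr
instance (arr : List Int) (out : String) : Decidable (Spec_seating_arrangements arr out) := by unfold Spec_seating_arrangements; infer_instance

-- ===== CLAIM (what is proved, stated in full; the proofs are below) =====
def Claim_equal_seating_arrangements : Prop := ∀ (arr : List Int), Dom_seating_arrangements arr → Spec_seating_arrangements arr (seating_arrangements arr)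

-- ===== LEMMAS AND PROOFS =====

-- the permutation both programs realise, as a pure recursion on the list:
-- 2nd element to the front, 1st and last (in that nesting) to the back
def spin : List Int → List Int
  | [] => []
  | [a] => [a]
  | [a, b] => [b, a]
  | a :: b :: c :: rest =>
      b :: (spin ((c :: rest).dropLast) ++ [(c :: rest).getLast!, a])
termination_by M => M.length
decreasing_by simp; omega

theorem spin_big (a b mL : Int) (R : List Int) :
    spin (a :: b :: (R ++ [mL])) = b :: (spin R ++ [mL, a]) := by
  cases R with
  | nil => simp [spin]
  | cons r R' =>
    rw [show (r :: R') ++ [mL] = r :: (R' ++ [mL]) by simp, spin]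
    have h1 : (r :: (R' ++ [mL])).dropLast = r :: R' := by
      rw [show r :: (R' ++ [mL]) = (r :: R') ++ [mL] from by simp]
      exact List.dropLast_concat ..
    have h2 : (r :: (R' ++ [mL])).getLast! = mL := by
      rw [show r :: (R' ++ [mL]) = (r :: R') ++ [mL] from by simp]
      simp [List.getLast!]
    rw [h1, h2]

theorem loopA_stop (fuel : Nat) (arr : List Int) (i i2 : Int)
    (h : (i - i2).natAbs ≤ 1) : seatingLoopA fuel arr i i2 = arr := by
  cases fuel with
  | zero => rfl
  | succ f => rw [seatingLoopA]; simp [Nat.not_lt.mpr h]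

theorem pop_mid (P ys : List Int) (x : Int) :
    PySem.List.pop? (P ++ x :: ys) (P.length : Int) = some (x, P ++ ys) := by
  rw [PySem.List.pop?_natCast _ _ (by simp)]
  congr 1
  rw [List.getElem_of_append rfl rfl]
  rw [List.eraseIdx_append_of_length_le (le_refl _)]
  simp

-- the three primitive effects of one iteration of A's loop on the framed state
theorem stepA (P T rest : List Int) (a : Int) :
    PySem.List.pyGet? (P ++ (a :: rest) ++ T) (P.length : Int) = some a ∧
    PySem.List.insert (P ++ (a :: rest) ++ T)
        ((P.length : Int) + (((a :: rest).length : Nat) : Int)) a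
      = P ++ (a :: rest) ++ a :: T ∧
    PySem.List.pop? (P ++ (a :: rest) ++ a :: T) (P.length : Int)
      = some (a, P ++ rest ++ a :: T) := by
  refine ⟨?_, ?_, ?_⟩
  · rw [List.append_assoc, List.cons_append]
    exact PySem.List.pyGet?_append_length ..
  · have hc : ((P.length : Int) + (((a :: rest).length : Nat) : Int))
        = ((P.length + (a :: rest).length : Nat) : Int) := by push_cast; ring
    rw [hc, PySem.List.insert_natCast _ _ _ (by simp)]
    rw [show P ++ (a :: rest) ++ T = (P ++ (a :: rest)) ++ T from rfl,
      List.take_left' (by simp), List.drop_left' (by simp)]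
  · rw [show P ++ (a :: rest) ++ a :: T = P ++ (a :: (rest ++ a :: T)) from by simp,
      pop_mid]
    simp

-- A's loop, framed: prefix P and suffix T are already in place, M is the working window
theorem loopA_spec (m : Nat) : ∀ (M P T : List Int) (fuel : Nat),
    M.length = m → (m + 1) / 3 ≤ fuel →
    seatingLoopA fuel (P ++ M ++ T) ((P.length : Int) + ((M.length : Nat) : Int)) (P.length : Int)
      = P ++ spin M ++ T := by
  induction m using Nat.strong_induction_on with
  | _ m ih =>
    intro M P T fuel hm hfuel
    by_cases hsmall : M.length ≤ 1
    · rw [loopA_stop fuel (P ++ M ++ T) _ _ (by omega)]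
      match M, hsmall with
      | [], _ => simp [spin]
      | [a], _ => simp [spin]
    · cases fuel with
      | zero => omega
      | succ f =>
        rw [seatingLoopA]
        rw [if_pos (show (((P.length : Int) + ((M.length : Nat) : Int)) - (P.length : Int)).natAbs > 1 by omega)]
        rcases M with _ | ⟨a, M'⟩
        · simp at hsmall
        rcases M' with _ | ⟨b, rest⟩
        · simp at hsmall
        obtain ⟨h1, h2, h3⟩ := stepA P T (b :: rest) a
        simp only [h1, h2, h3]
        rcases List.eq_nil_or_concat rest with hrest | ⟨R, mL, hrest⟩
        · subst hrest
          rw [loopA_stop f _ _ _ (by simp)]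
          simp [spin]
        · rw [List.concat_eq_append] at hrest
          subst hrest
          have harr : P ++ (b :: (R ++ [mL])) ++ a :: T
              = (P ++ [b]) ++ R ++ (mL :: a :: T) := by simp
          have hi2 : (P.length : Int) + 1 = (((P ++ [b]).length : Nat) : Int) := by
            simp
          have hi : (P.length : Int) + (((a :: b :: (R ++ [mL])).length : Nat) : Int) - 2
              = (((P ++ [b]).length : Nat) : Int) + ((R.length : Nat) : Int) := by
            simp
            ring
          rw [harr, hi2, hi,
            ih R.length (by simp at hm; omega) R (P ++ [b]) (mL :: a :: T) f rfl
              (by simp at hm hfuel ⊢; omega)]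
          rw [spin_big]
          simp

theorem take_last (l : List Int) (n : Nat) (hn : n < l.length) :
    l.take (n + 1) = l.take n ++ [l.getD n 0] := by
  rw [List.take_add_one, List.getElem?_eq_getElem hn]
  simp [List.getD, List.getElem?_eq_getElem hn]

theorem drop_cons_getD (l : List Int) (n : Nat) (hn : n < l.length) :
    l.drop n = l.getD n 0 :: l.drop (n + 1) := by
  rw [List.drop_eq_getElem_cons hn]
  simp [List.getD, List.getElem?_eq_getElem hn]

-- decomposing the window arr[lo:hi] the way one sweep round consumes it
theorem window (arr : List Int) (lo hi : Nat) (h3 : lo + 3 ≤ hi) (hhi : hi ≤ arr.length) :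
    (arr.drop lo).take (hi - lo)
      = arr.getD lo 0 :: arr.getD (lo + 1) 0 ::
          ((arr.drop (lo + 2)).take (hi - 1 - (lo + 2)) ++ [arr.getD (hi - 1) 0]) := by
  rw [drop_cons_getD arr lo (by omega),
    show hi - lo = (hi - lo - 1) + 1 by omega, List.take_succ_cons,
    drop_cons_getD arr (lo + 1) (by omega),
    show hi - lo - 1 = (hi - lo - 2) + 1 by omega, List.take_succ_cons,
    show hi - lo - 2 = (hi - 1 - (lo + 2)) + 1 by omega,
    take_last _ _ (by rw [List.length_drop]; omega)]
  have hidx : lo + 2 + (hi - 1 - (lo + 2)) = hi - 1 := by omega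
  have : (arr.drop (lo + 2)).getD (hi - 1 - (lo + 2)) 0 = arr.getD (hi - 1) 0 := by
    simp only [List.getD, List.getElem?_drop, hidx]
  rw [this]

-- B's sweep, framed: the window is arr[lo:hi]
theorem sweep_spec (m : Nat) : ∀ (arr front back : List Int) (lo hi : Nat),
    hi ≤ arr.length → lo ≤ hi → hi - lo = m →
    (seatingSweep arr (lo : Int) (hi : Int) front back).1 ++
      (seatingSweep arr (lo : Int) (hi : Int) front back).2.reverse
      = front ++ spin ((arr.drop lo).take (hi - lo)) ++ back.reverse := by
  induction m using Nat.strong_induction_on with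
  | _ m ih =>
    intro arr front back lo hi hhi hlohi hm
    rw [seatingSweep]
    by_cases h3 : lo + 3 ≤ hi
    · rw [if_pos (by omega)]
      have g0 : PySem.List.pyGetD arr (lo : Int) 0 = arr.getD lo 0 :=
        PySem.List.pyGetD_natCast ..
      have g1 : PySem.List.pyGetD arr ((lo : Int) + 1) 0 = arr.getD (lo + 1) 0 := by
        rw [show (lo : Int) + 1 = ((lo + 1 : Nat) : Int) by push_cast; ring]
        exact PySem.List.pyGetD_natCast ..
      have gh : PySem.List.pyGetD arr ((hi : Int) - 1) 0 = arr.getD (hi - 1) 0 := by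
        rw [show (hi : Int) - 1 = ((hi - 1 : Nat) : Int) by omega]
        exact PySem.List.pyGetD_natCast ..
      rw [g0, g1, gh]
      rw [show (lo : Int) + 2 = ((lo + 2 : Nat) : Int) by push_cast; ring,
        show (hi : Int) - 1 = ((hi - 1 : Nat) : Int) by omega]
      rw [ih (hi - 1 - (lo + 2)) (by omega) arr _ _ (lo + 2) (hi - 1)
        (by omega) (by omega) rfl]
      rw [window arr lo hi h3 hhi, spin_big]
      simp
    · rw [if_neg (by omega)]
      rcases Nat.lt_or_ge lo arr.length with hlo | hlo
      all_goals by_cases h2 : hi - lo = 2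
      · rw [if_pos (by omega)]
        rw [show (arr.drop lo).take (hi - lo) = [arr.getD lo 0, arr.getD (lo + 1) 0] by
          rw [drop_cons_getD arr lo (by omega), h2, List.take_succ_cons,
            drop_cons_getD arr (lo + 1) (by omega)]
          simp]
        have g0 : PySem.List.pyGetD arr (lo : Int) 0 = arr.getD lo 0 :=
          PySem.List.pyGetD_natCast ..
        have g1 : PySem.List.pyGetD arr ((lo : Int) + 1) 0 = arr.getD (lo + 1) 0 := by
          rw [show (lo : Int) + 1 = ((lo + 1 : Nat) : Int) by push_cast; ring]
          exact PySem.List.pyGetD_natCast ..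
        rw [g0, g1]
        simp [spin]
      · by_cases h1 : hi - lo = 1
        · rw [if_neg (by omega), if_pos (by omega)]
          rw [show (arr.drop lo).take (hi - lo) = [arr.getD lo 0] by
            rw [drop_cons_getD arr lo (by omega), h1, List.take_succ_cons]
            simp]
          rw [PySem.List.pyGetD_natCast]
          simp [spin]
        · rw [if_neg (by omega), if_neg (by omega)]
          have : hi - lo = 0 := by omega
          rw [this]
          simp [spin]
      · omega
      · rw [if_neg (by omega)]
        by_cases h1 : hi - lo = 1
        · omega
        · rw [if_neg (by omega)]
          have : hi - lo = 0 := by omega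
          rw [this]
          simp [spin]

theorem join_empty_cons (x : String) (l : List String) :
    PySem.Str.join "" (x :: l) = x ++ PySem.Str.join "" l := by
  cases l with
  | nil => simp [PySem.Str.join, PySem.Chars.join_singleton, PySem.Chars.join_nil,
      String.ofList_toList]
  | cons y t => simp [PySem.Str.join, PySem.Chars.join_cons_cons, String.ofList_append,
      String.ofList_toList]

theorem join_empty_append (X Y : List String) :
    PySem.Str.join "" (X ++ Y) = PySem.Str.join "" X ++ PySem.Str.join "" Y := by
  induction X with
  | nil => simp [PySem.Str.join, PySem.Chars.join_nil]
  | cons x t ih => simp only [List.cons_append, join_empty_cons, ih, String.append_assoc]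

theorem foldl_toStr (L : List Int) (s : String) :
    L.foldl (fun res el => res ++ PySem.Int.toStr el ++ " ") s
      = s ++ PySem.Str.join "" (L.map (fun el => PySem.Int.toStr el ++ " ")) := by
  induction L generalizing s with
  | nil => simp [PySem.Str.join, PySem.Chars.join_nil]
  | cons x t ih =>
    rw [List.foldl_cons, ih, List.map_cons, join_empty_cons]
    simp [String.append_assoc]

-- ===== VERDICT (by name: the statement is the Claim_ definition above) =====
theorem seating_arrangements_spec : Claim_equal_seating_arrangements := by
  intro arr _
  unfold Spec_seating_arrangements seating_arrangements seating_arrangements_alt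
  have hA := loopA_spec arr.length arr [] [] arr.length rfl (by omega)
  simp only [List.nil_append, List.append_nil, List.length_nil, Int.natCast_zero,
    zero_add] at hA
  rw [hA, foldl_toStr]
  have hB := sweep_spec arr.length arr [] [] 0 arr.length (le_refl _) (by omega) rfl
  simp only [List.append_nil, List.nil_append, List.reverse_nil, List.drop_zero,
    Nat.sub_zero, List.take_length, Int.natCast_zero] at hB
  rw [← join_empty_append, ← List.map_append, hB]
  simp
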